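-- pv_equiv track=rewrite | github.com/HaroldMills/Vesper-Tseep-Thrush | extract_old_bird_detector_filter.py | _is_sequence_symmetric
-- ===== SOURCE A (Python) =====
-- def _is_sequence_symmetric(seq, num_size):
--     n = len(seq)
--     m = int(n / num_size) // 2
--     for i in range(m):
--         j = i * num_size
--         k = n - (i + 1) * num_size
--         if seq[j:j + num_size] != seq[k:k + num_size]:
--             return False
--     return True
-- ===== SOURCE B (Python) =====
-- def _is_sequence_symmetric(seq, num_size):
--     n = len(seq)
--     m = n // (2 * num_size)
--     first = seq[:m * num_size]
--     rev = []
--     for i in range(m):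
--         rev += seq[n - (i + 1) * num_size : n - i * num_size]
--     return first == rev
-- ===== Notes on version B (the rewrite author's own statement) =====
-- stated objective: alternative
-- what changed: Replaces the indexed early-exit loop comparing block pairs with building the end-anchored blocks (in front order) into one list and returning a single list equality against the prefix seq[:m*num_size].
-- outside the precondition, e.g. on _is_sequence_symmetric([1, 2, 3, 4, 5], -2): A returns True, B returns False
import Mathlib
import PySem

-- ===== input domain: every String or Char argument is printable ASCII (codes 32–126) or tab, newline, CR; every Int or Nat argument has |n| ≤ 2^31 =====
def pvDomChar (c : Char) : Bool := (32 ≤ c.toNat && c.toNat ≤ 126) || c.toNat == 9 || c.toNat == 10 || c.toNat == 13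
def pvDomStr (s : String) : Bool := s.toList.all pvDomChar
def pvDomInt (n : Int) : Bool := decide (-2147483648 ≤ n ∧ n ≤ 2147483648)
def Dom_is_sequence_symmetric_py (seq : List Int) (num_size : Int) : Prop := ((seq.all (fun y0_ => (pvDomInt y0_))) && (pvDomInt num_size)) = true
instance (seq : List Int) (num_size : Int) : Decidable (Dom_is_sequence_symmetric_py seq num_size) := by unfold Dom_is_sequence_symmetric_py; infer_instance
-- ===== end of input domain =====

-- B replaces A's indexed early-exit block-pair loop by building the end-anchored blocks into one
-- list and returning a single list equality against the prefix (objective: alternative decomposition).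


-- ===== PORT A =====
-- the 'for i in range(m): … return False' loop with its early exit
def pvLoopA (seq : List Int) (ns : Int) (n : Int) : List Int → Bool
  | [] => true
  | i :: rest =>
      let j := i * ns
      let k := n - (i + 1) * ns
      if PySem.List.slice seq (some j) (some (j + ns)) ≠ PySem.List.slice seq (some k) (some (k + ns)) then
        false
      else pvLoopA seq ns n rest

def is_sequence_symmetric_py (seq : List Int) (num_size : Int) : Bool :=
  let n : Int := seq.length
  let m : Int := PySem.Int.floordiv (PySem.Int.truncdiv n num_size) 2
  pvLoopA seq num_size n (PySem.List.pyRange 0 m 1)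

-- ===== PORT B =====
def is_sequence_symmetric_py_alt (seq : List Int) (num_size : Int) : Bool :=
  let n : Int := seq.length
  let m : Int := PySem.Int.floordiv n (2 * num_size)
  let first := PySem.List.slice seq none (some (m * num_size))
  let rev := (PySem.List.pyRange 0 m 1).foldl
      (fun acc i => acc ++ PySem.List.slice seq (some (n - (i + 1) * num_size)) (some (n - i * num_size))) []
  first == rev

-- ===== PRECONDITION & SPEC =====
-- Pre_ requires a positive block size: num_size = 0 makes A raise ZeroDivisionError, and a negative
-- num_size is outside the natural domain of a block size (A returns a vacuous True there).
def Pre_is_sequence_symmetric_py (seq : List Int) (num_size : Int) : Prop := 1 ≤ num_size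
instance (seq : List Int) (num_size : Int) : Decidable (Pre_is_sequence_symmetric_py seq num_size) := by unfold Pre_is_sequence_symmetric_py; infer_instance
def pvWitness_is_sequence_symmetric_py : List Int × Int := ([1, 2, 2, 1], 2)

def Spec_is_sequence_symmetric_py (seq : List Int) (num_size : Int) (out : Bool) : Prop := out = is_sequence_symmetric_py_alt seq num_size
instance (seq : List Int) (num_size : Int) (out : Bool) : Decidable (Spec_is_sequence_symmetric_py seq num_size out) := by unfold Spec_is_sequence_symmetric_py; infer_instance

-- ===== CLAIM (what is proved, stated in full; the proofs are below) =====
def Claim_equal_is_sequence_symmetric_py : Prop := ∀ (seq : List Int) (num_size : Int), Dom_is_sequence_symmetric_py seq num_size → Pre_is_sequence_symmetric_py seq num_size → Spec_is_sequence_symmetric_py seq num_size (is_sequence_symmetric_py seq num_size)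

-- ===== LEMMAS AND PROOFS =====

-- the i-th front block seq[i*B : (i+1)*B] and the i-th end-anchored block seq[N-(i+1)*B : N-i*B]
def pvFront (seq : List Int) (B i : Nat) : List Int := (seq.drop (i * B)).take B
def pvBack (seq : List Int) (B i : Nat) : List Int := (seq.drop (seq.length - (i + 1) * B)).take B

lemma pv_m_eq (N B : Nat) :
    PySem.Int.floordiv (PySem.Int.truncdiv (N : Int) (B : Int)) 2 = ((N / (2 * B) : Nat) : Int) := by
  have h : PySem.Int.truncdiv (N : Int) (B : Int) = ((N / B : Nat) : Int) := rfl
  rw [h]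
  have h2 : PySem.Int.floordiv ((N / B : Nat) : Int) ((2:Nat):Int) = ((N / B / 2 : Nat) : Int) :=
    PySem.Int.floordiv_natCast _ _
  rw [show ((2:Nat):Int) = (2:Int) from rfl] at h2
  rw [h2, Nat.div_div_eq_div_mul, Nat.mul_comm]

lemma pv_m_eq' (N B : Nat) :
    PySem.Int.floordiv (N : Int) (2 * (B : Int)) = ((N / (2 * B) : Nat) : Int) := by
  have h := PySem.Int.floordiv_natCast N (2 * B)
  rw [show (((2 * B : Nat)) : Int) = 2 * (B : Int) by push_cast; ring] at h
  exact h

lemma pv_sliceFront (seq : List Int) (B i : Nat) :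
    PySem.List.slice seq (some ((i : Int) * (B : Int))) (some ((i : Int) * (B : Int) + (B : Int))) =
      pvFront seq B i := by
  rw [show ((i : Int) * (B : Int)) = ((i * B : Nat) : Int) by push_cast; ring]
  exact PySem.List.slice_natCast_add seq (i * B) B

lemma pv_sliceBack (seq : List Int) (B i : Nat) (h : (i + 1) * B ≤ seq.length) :
    PySem.List.slice seq (some ((seq.length : Int) - ((i : Int) + 1) * (B : Int)))
        (some ((seq.length : Int) - (i : Int) * (B : Int))) = pvBack seq B i := by
  have hi : i * B ≤ seq.length := le_trans (by nlinarith) h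
  rw [show ((seq.length : Int) - ((i : Int) + 1) * (B : Int)) = ((seq.length - (i + 1) * B : Nat) : Int) by
        rw [Nat.cast_sub h]; push_cast; ring,
      show ((seq.length : Int) - (i : Int) * (B : Int)) = ((seq.length - i * B : Nat) : Int) by
        rw [Nat.cast_sub hi]; push_cast; ring,
      PySem.List.slice_natCast]
  unfold pvBack
  congr 1
  rw [Nat.succ_mul] at h ⊢
  omega

lemma pv_len_front (seq : List Int) (B i : Nat) (h : (i + 1) * B ≤ seq.length) :
    (pvFront seq B i).length = B := by
  rw [Nat.succ_mul] at h
  simp only [pvFront, List.length_take, List.length_drop]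
  omega

lemma pv_len_back (seq : List Int) (B i : Nat) (h : (i + 1) * B ≤ seq.length) :
    (pvBack seq B i).length = B := by
  simp only [pvBack, List.length_take, List.length_drop, Nat.succ_mul] at h ⊢
  omega

lemma pv_loopA_eq (seq : List Int) (B : Nat) (l : List Nat)
    (hl : ∀ i ∈ l, (i + 1) * B ≤ seq.length) :
    pvLoopA seq (B : Int) (seq.length : Int) (l.map (fun k : Nat => (k : Int))) =
      decide (∀ i ∈ l, pvFront seq B i = pvBack seq B i) := by
  induction l with
  | nil => simp [pvLoopA]
  | cons a t ih =>
      have ha := hl a (by simp)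
      simp only [List.map_cons, pvLoopA]
      rw [show ((seq.length : Int) - ((a : Int) + 1) * (B : Int) + (B : Int)) =
            ((seq.length : Int) - (a : Int) * (B : Int)) by ring]
      rw [pv_sliceFront, pv_sliceBack seq B a ha]
      by_cases heq : pvFront seq B a = pvBack seq B a
      · simp only [heq, ne_eq, not_true_eq_false, if_false]
        rw [ih (fun i hi => hl i (by simp [hi]))]
        simp [heq]
      · simp [heq]

lemma pv_take_flatten (seq : List Int) (B t : Nat) :
    seq.take (t * B) = ((List.range t).map (pvFront seq B)).flatten := by
  induction t with
  | zero => simp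
  | succ t ih =>
      rw [List.range_succ, List.map_append, List.flatten_append, ← ih]
      have : (t + 1) * B = t * B + B := by ring
      rw [this, List.take_add]
      simp [pvFront]

lemma pv_flatten_len (f : Nat → List Int) (B t : Nat) (h : ∀ i < t, (f i).length = B) :
    (((List.range t).map f).flatten).length = t * B := by
  induction t with
  | zero => simp
  | succ t ih =>
      rw [List.range_succ, List.map_append, List.flatten_append, List.length_append,
        ih (fun i hi => h i (by omega))]
      simp only [List.map_cons, List.map_nil, List.flatten_cons, List.flatten_nil,
        List.append_nil, h t (by omega)]
      ring

lemma pv_flatten_eq_iff (f g : Nat → List Int) (B t : Nat)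
    (hf : ∀ i < t, (f i).length = B) (hg : ∀ i < t, (g i).length = B) :
    (((List.range t).map f).flatten = ((List.range t).map g).flatten) ↔ ∀ i < t, f i = g i := by
  induction t with
  | zero => simp
  | succ t ih =>
      rw [List.range_succ]
      simp only [List.map_append, List.flatten_append, List.map_cons, List.map_nil,
        List.flatten_cons, List.flatten_nil, List.append_nil]
      have hlen : (((List.range t).map f).flatten).length = (((List.range t).map g).flatten).length := by
        rw [pv_flatten_len f B t (fun i hi => hf i (by omega)),
          pv_flatten_len g B t (fun i hi => hg i (by omega))]
      constructor
      · intro h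
        obtain ⟨h1, h2⟩ := List.append_inj h hlen
        intro i hi
        rcases Nat.lt_succ_iff_lt_or_eq.mp hi with hi' | rfl
        · exact ((ih (fun i hi => hf i (by omega)) (fun i hi => hg i (by omega))).mp h1) i hi'
        · exact h2
      · intro h
        rw [(ih (fun i hi => hf i (by omega)) (fun i hi => hg i (by omega))).mpr
          (fun i hi => h i (by omega)), h t (by omega)]

-- ===== VERDICT (by name: the statement is the Claim_ definition above) =====
theorem is_sequence_symmetric_py_spec : Claim_equal_is_sequence_symmetric_py := by
  intro seq ns _ hpre
  unfold Spec_is_sequence_symmetric_py is_sequence_symmetric_py is_sequence_symmetric_py_alt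
  unfold Pre_is_sequence_symmetric_py at hpre
  obtain ⟨B, rfl⟩ : ∃ B : Nat, ns = (B : Int) := ⟨ns.toNat, (Int.toNat_of_nonneg (by omega)).symm⟩
  have hMB : (seq.length / (2 * B)) * (2 * B) ≤ seq.length := Nat.div_mul_le_self _ _
  have hblk : ∀ i, i < seq.length / (2 * B) → (i + 1) * B ≤ seq.length := by
    intro i hi
    calc (i + 1) * B ≤ (seq.length / (2 * B)) * B := Nat.mul_le_mul_right B hi
    _ ≤ (seq.length / (2 * B)) * (2 * B) := by nlinarith
    _ ≤ seq.length := hMB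
  simp only [pv_m_eq, pv_m_eq', PySem.List.pyRange_zero_nat]
  rw [pv_loopA_eq seq B (List.range (seq.length / (2 * B)))
    (fun i hi => hblk i (List.mem_range.mp hi))]
  rw [List.foldl_map, PySem.List.foldl_append_eq_flatMap, List.nil_append]
  rw [show ((seq.length / (2 * B) : Nat) : Int) * (B : Int) = ((seq.length / (2 * B) * B : Nat) : Int) by
        push_cast; ring,
      PySem.List.slice_to_natCast, pv_take_flatten seq B (seq.length / (2 * B))]
  have hrev : (List.range (seq.length / (2 * B))).flatMap
      (fun k : Nat => PySem.List.slice seq (some ((seq.length : Int) - ((k : Int) + 1) * (B : Int)))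
        (some ((seq.length : Int) - (k : Int) * (B : Int)))) =
      ((List.range (seq.length / (2 * B))).map (pvBack seq B)).flatten := by
    rw [List.flatMap_def]
    congr 1
    exact List.map_congr_left (fun i hi => pv_sliceBack seq B i (hblk i (List.mem_range.mp hi)))
  rw [hrev]
  have hiff := pv_flatten_eq_iff (pvFront seq B) (pvBack seq B) B (seq.length / (2 * B))
    (fun i hi => pv_len_front seq B i (hblk i hi)) (fun i hi => pv_len_back seq B i (hblk i hi))
  have hbool : ∀ (X Y : List Int), (X == Y) = decide (X = Y) := by
    intro X Y; by_cases h : X = Y <;> simp [h]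
  rw [hbool, decide_eq_decide, hiff]
  simp [List.mem_range]
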